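-- pv_equiv track=rewrite | github.com/sempruijs/aoc | 2020/03/main.py | calculated_position
-- ===== SOURCE A (Python) =====
-- current_position = 0
--
-- def calculated_position(right):
--     counter = current_position
--     right_used = right
--     while right_used > 0:
--         if counter == 30:
--             counter = 0
--             right_used -= 1
--         else:
--             counter += 1
--             right_used -= 1
--     return counter
-- ===== SOURCE B (Python) =====
-- current_position = 0
--
-- def calculated_position(right):
--     if right <= 0:
--         return current_position
--     return (current_position + right) % 31
-- ===== Notes on version B (the rewrite author's own statement) =====
-- stated objective: faster
-- what changed: Replaces the step-by-step wrapping loop with one direct modulo of the step count by the wrap width, computed in a single arithmetic operation.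
import Mathlib
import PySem

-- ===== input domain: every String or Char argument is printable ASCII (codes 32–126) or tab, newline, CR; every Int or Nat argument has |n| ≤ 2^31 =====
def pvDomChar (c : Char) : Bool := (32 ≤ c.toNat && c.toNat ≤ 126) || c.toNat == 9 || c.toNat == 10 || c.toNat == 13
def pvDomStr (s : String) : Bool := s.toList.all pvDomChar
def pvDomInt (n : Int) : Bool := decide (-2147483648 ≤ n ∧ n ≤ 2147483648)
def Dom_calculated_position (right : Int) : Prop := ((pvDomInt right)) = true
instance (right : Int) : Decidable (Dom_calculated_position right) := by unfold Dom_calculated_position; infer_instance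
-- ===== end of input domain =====

-- B replaces A's one-step-at-a-time wrapping loop with a single modulo computation (O(1) vs O(right)).

-- ===== PORT A =====
-- A's while loop: state (counter, right_used), one step per iteration.
def calcLoopA (counter right_used : Int) : Int :=
  if h : right_used > 0 then
    if counter == 30 then calcLoopA 0 (right_used - 1)
    else calcLoopA (counter + 1) (right_used - 1)
  else counter
termination_by right_used.toNat
decreasing_by all_goals omega

def calculated_position (right : Int) : Int := calcLoopA 0 right

-- ===== PORT B =====
def calculated_position_alt (right : Int) : Int :=
  if right ≤ 0 then 0
  else PySem.Int.mod (0 + right) 31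

-- ===== PRECONDITION & SPEC =====
def Spec_calculated_position (right : Int) (out : Int) : Prop := out = calculated_position_alt right
instance (right : Int) (out : Int) : Decidable (Spec_calculated_position right out) := by unfold Spec_calculated_position; infer_instance

-- ===== CLAIM (what is proved, stated in full; the proofs are below) =====
def Claim_equal_calculated_position : Prop := ∀ (right : Int), Dom_calculated_position right → Spec_calculated_position right (calculated_position right)

-- ===== LEMMAS AND PROOFS =====

-- Loop invariant: with 0 ≤ counter < 31, running n steps lands on (counter + n) mod 31.
theorem calcLoopA_eq_mod (n : Nat) : ∀ (counter : Int), 0 ≤ counter → counter < 31 →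
    calcLoopA counter (n : Int) = (counter + n) % 31 := by
  induction n with
  | zero =>
    intro counter h0 h31
    rw [calcLoopA]
    simp [Int.emod_eq_of_lt h0 (by omega)]
  | succ n ih =>
    intro counter h0 h31
    rw [calcLoopA]
    have hpos : ((n + 1 : Nat) : Int) > 0 := by omega
    rw [dif_pos hpos]
    by_cases hc : counter = 30
    · have : ((n + 1 : Nat) : Int) - 1 = (n : Int) := by omega
      rw [if_pos (by simp [hc]), this, ih 0 (by omega) (by omega)]
      subst hc
      push_cast
      omega
    · have : ((n + 1 : Nat) : Int) - 1 = (n : Int) := by omega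
      rw [if_neg (by simpa using hc), this, ih (counter + 1) (by omega) (by omega)]
      congr 1
      push_cast
      ring

-- ===== VERDICT (by name: the statement is the Claim_ definition above) =====
theorem calculated_position_spec : Claim_equal_calculated_position := by
  intro right _
  unfold Spec_calculated_position calculated_position calculated_position_alt
  by_cases h : right ≤ 0
  · rw [if_pos h, calcLoopA, dif_neg (by omega)]
  · rw [if_neg h]
    have hmod : PySem.Int.mod (0 + right) 31 = (0 + right) % 31 :=
      PySem.Int.mod_eq_emod_of_pos (by norm_num)
    rw [hmod]
    obtain ⟨n, hn⟩ : ∃ n : Nat, right = (n : Int) := ⟨right.toNat, by omega⟩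
    subst hn
    simpa using calcLoopA_eq_mod n 0 (by omega) (by omega)
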